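-- pv_equiv track=rewrite | github.com/BitTrace-AI/bittrace_api_v3_source | src/bittrace/v3/golden_reference.py | _select_reference_greedy_medoids
-- ===== SOURCE A (Python) =====
-- from collections.abc import Mapping, Sequence
--
-- def _bit_distance(left: int, right: int) -> int:
--     return (left ^ right).bit_count()
--
-- def _select_reference_single_medoid(rows: Sequence[int]) -> int:
--     return min(
--         rows,
--         key=lambda row: (
--             sum(_bit_distance(row, other) for other in rows),
--             row,
--         ),
--     )
--
-- def _select_reference_greedy_medoids(rows: Sequence[int], selected_k: int) -> tuple[int, ...]:
--     selected = [_select_reference_single_medoid(rows)]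
--     while len(selected) < selected_k:
--         remaining = [row for row in rows if row not in selected]
--         next_row = max(
--             remaining,
--             key=lambda row: (
--                 min(_bit_distance(row, chosen) for chosen in selected),
--                 -row,
--             ),
--         )
--         selected.append(next_row)
--     return tuple(sorted(selected))
-- ===== SOURCE B (Python) =====
-- def _select_reference_greedy_medoids(rows, selected_k):
--     # initial medoid: min over (sum-of-distances, row) pairs
--     sums = [sum((row ^ other).bit_count() for other in rows) for row in rows]
--     best = min(zip(sums, rows))[1]
--     selected = [best]
--     chosen = {best}
--     # farthest-point greedy with an incrementally maintained min-distance array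
--     mind = [(r ^ best).bit_count() for r in rows]
--     while len(selected) < selected_k:
--         pick = None  # (row, min-distance) of the current best candidate
--         for r, m in zip(rows, mind):
--             if r in chosen:
--                 continue
--             if pick is None or (m, -r) > (pick[1], -pick[0]):
--                 pick = (r, m)
--         if pick is None:
--             break  # fewer distinct rows than selected_k (A raises here)
--         nxt = pick[0]
--         selected.append(nxt)
--         chosen.add(nxt)
--         mind = [d if d < m else m for m, d in zip(mind, ((x ^ nxt).bit_count() for x in rows))]
--     return tuple(sorted(selected))
-- ===== Notes on version B (the rewrite author's own statement) =====
-- stated objective: faster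
-- what changed: The greedy loop no longer rebuilds the remaining list and recomputes min-distance to every selected medoid for every candidate; B maintains a per-row minimum-distance array updated once per newly selected medoid, so each round is one O(n) scan instead of O(n*k) recomputation.
import Mathlib
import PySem

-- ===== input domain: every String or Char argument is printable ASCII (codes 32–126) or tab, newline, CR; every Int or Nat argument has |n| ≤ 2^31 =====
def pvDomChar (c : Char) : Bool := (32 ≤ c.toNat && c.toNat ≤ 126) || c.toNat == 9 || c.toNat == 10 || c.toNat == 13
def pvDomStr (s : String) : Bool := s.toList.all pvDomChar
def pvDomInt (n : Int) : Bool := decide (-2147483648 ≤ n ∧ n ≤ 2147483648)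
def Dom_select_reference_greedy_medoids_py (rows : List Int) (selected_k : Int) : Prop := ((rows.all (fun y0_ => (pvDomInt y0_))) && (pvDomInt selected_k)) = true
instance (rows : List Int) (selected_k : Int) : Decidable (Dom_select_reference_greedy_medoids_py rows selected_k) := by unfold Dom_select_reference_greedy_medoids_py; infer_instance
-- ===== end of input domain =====

-- B replaces A's per-round remaining-list rebuild and per-candidate min-over-selected recomputation by an
-- incrementally maintained per-row minimum-distance array (one O(n) update per selected medoid): faster.

-- ===== PORT A =====
-- _bit_distance(left, right) = (left ^ right).bit_count()
def pyBitDist (l r : Int) : Int := (PySem.Int.bitCount (PySem.Int.bxor l r) : Int)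

-- sum(_bit_distance(row, other) for other in rows)
def pvSumDist (rows : List Int) (row : Int) : Int := (rows.map (fun other => pyBitDist row other)).sum

-- min(_bit_distance(row, chosen) for chosen in selected)  (default 0 unreachable: selected is nonempty)
def pvDMin (sel : List Int) (r : Int) : Int :=
  (PySem.List.min? (sel.map (fun c => pyBitDist r c)) (fun v => v)).getD 0

-- the while-loop of A; fuel = selected_k.toNat bounds the number of iterations (each adds one element)
def pvA_loop (rows : List Int) (k : Int) : Nat → List Int → List Int
  | 0, sel => sel
  | fuel+1, sel =>
    if (sel.length : Int) < k then
      let remaining := rows.filter (fun r => !(List.contains sel r))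
      match PySem.List.max2? remaining (fun r => pvDMin sel r) (fun r => -r) with
      | none => sel  -- remaining empty: Python's max raises ValueError here (outside Pre_)
      | some nxt => pvA_loop rows k fuel (sel ++ [nxt])
    else sel

def select_reference_greedy_medoids_py (rows : List Int) (selected_k : Int) : List Int :=
  match PySem.List.min2? rows (fun row => pvSumDist rows row) (fun row => row) with
  | none => []  -- rows empty: min raises ValueError (outside Pre_)
  | some m => PySem.List.sorted (pvA_loop rows selected_k selected_k.toNat [m]) (fun x => x) false

-- ===== PORT B =====
-- the scan over zip(rows, mind): pick = None / (r, m); tuple comparison (m, -r) > (pick[1], -pick[0]) unfolded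
def pvB_pick (chosen : List Int) (pairs : List (Int × Int)) : Option (Int × Int) :=
  pairs.foldl (fun pick rm =>
    if List.contains chosen rm.1 then pick
    else match pick with
      | none => some rm
      | some p => if p.2 < rm.2 || (p.2 == rm.2 && -p.1 < -rm.1) then some rm else pick) none

def pvB_loop (rows : List Int) (k : Int) : Nat → List Int → List Int → List Int → List Int
  | 0, sel, _, _ => sel
  | fuel+1, sel, chosen, mind =>
    if (sel.length : Int) < k then
      match pvB_pick chosen (rows.zip mind) with
      | none => sel  -- pick is None: break
      | some p =>
        pvB_loop rows k fuel (sel ++ [p.1]) (PySem.Set.add chosen p.1)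
          ((mind.zip (rows.map (fun x => pyBitDist x p.1))).map (fun md => if md.2 < md.1 then md.2 else md.1))
    else sel

def select_reference_greedy_medoids_py_alt (rows : List Int) (selected_k : Int) : List Int :=
  match PySem.List.min2? ((rows.map (fun row => pvSumDist rows row)).zip rows) (fun p => p.1) (fun p => p.2) with
  | none => []  -- rows empty: min raises ValueError (outside Pre_)
  | some p =>
    PySem.List.sorted
      (pvB_loop rows selected_k selected_k.toNat [p.2] (PySem.Set.ofList [p.2])
        (rows.map (fun r => pyBitDist r p.2)))
      (fun x => x) false

-- ===== PRECONDITION & SPEC =====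
-- Pre_ excludes exactly the inputs where Python A raises ValueError: empty rows (min of an empty
-- sequence) and selected_k exceeding the number of distinct rows (max of an empty remaining list).
def Pre_select_reference_greedy_medoids_py (rows : List Int) (selected_k : Int) : Prop :=
  rows ≠ [] ∧ selected_k ≤ ((PySem.List.dedup rows).length : Int)
instance (rows : List Int) (selected_k : Int) : Decidable (Pre_select_reference_greedy_medoids_py rows selected_k) := by unfold Pre_select_reference_greedy_medoids_py; infer_instance
def pvWitness_select_reference_greedy_medoids_py : List Int × Int := ([0, 1, 2], 2)

def Spec_select_reference_greedy_medoids_py (rows : List Int) (selected_k : Int) (out : List Int) : Prop := out = select_reference_greedy_medoids_py_alt rows selected_k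
instance (rows : List Int) (selected_k : Int) (out : List Int) : Decidable (Spec_select_reference_greedy_medoids_py rows selected_k out) := by unfold Spec_select_reference_greedy_medoids_py; infer_instance

-- ===== CLAIM (what is proved, stated in full; the proofs are below) =====
def Claim_equal_select_reference_greedy_medoids_py : Prop := ∀ (rows : List Int) (selected_k : Int), Dom_select_reference_greedy_medoids_py rows selected_k → Pre_select_reference_greedy_medoids_py rows selected_k → Spec_select_reference_greedy_medoids_py rows selected_k (select_reference_greedy_medoids_py rows selected_k)

-- ===== LEMMAS AND PROOFS =====

-- folding the mapped list with a step that agrees (through Option.map e) with the unmapped step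
lemma pv_foldl_opt_map_rel {α β : Type} (e : α → β) (sA : Option α → α → Option α)
    (sB : Option β → β → Option β) :
    ∀ (l : List α) (acc : Option α),
      (∀ (a : Option α) (x : α), x ∈ l → sB (Option.map e a) (e x) = Option.map e (sA a x)) →
      List.foldl sB (Option.map e acc) (l.map e) = Option.map e (List.foldl sA acc l) := by
  intro l
  induction l with
  | nil => intro acc _; rfl
  | cons x t ih =>
    intro acc h
    simp only [List.map_cons, List.foldl_cons]
    rw [h acc x (by simp)]
    exact ih (sA acc x) (fun a y hy => h a y (by simp [hy]))

lemma pv_map_zip_self (f : Int → Int) (l : List Int) :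
    (l.map f).zip l = l.map (fun r => (f r, r)) := by
  induction l with
  | nil => rfl
  | cons x t ih => simp [ih]

lemma pv_zip_map_self (f : Int → Int) (l : List Int) :
    l.zip (l.map f) = l.map (fun r => (r, f r)) := by
  induction l with
  | nil => rfl
  | cons x t ih => simp [ih]

lemma pv_zip_map_map (f g : Int → Int) (l : List Int) :
    (l.map f).zip (l.map g) = l.map (fun r => (f r, g r)) := by
  induction l with
  | nil => rfl
  | cons x t ih => simp [ih]

-- B's initial min over zip(sums, rows) equals A's min over rows with the (sum, row) key
lemma pv_init_eq (rows : List Int) :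
    PySem.List.min2? ((rows.map (fun row => pvSumDist rows row)).zip rows) (fun p => p.1) (fun p => p.2)
      = Option.map (fun r => (pvSumDist rows r, r))
          (PySem.List.min2? rows (fun row => pvSumDist rows row) (fun row => row)) := by
  rw [pv_map_zip_self]
  unfold PySem.List.min2?
  exact pv_foldl_opt_map_rel (fun r => (pvSumDist rows r, r)) _ _ rows none (by
    intro a x _
    cases a with
    | none => rfl
    | some m => by_cases h : pvSumDist rows x < pvSumDist rows m ∨ pvSumDist rows x ≤ pvSumDist rows m ∧ x < m <;> simp [h])

-- appending a medoid updates the min-distance pointwise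
lemma pv_dmin_append (sel : List Int) (hsel : sel ≠ []) (r x : Int) :
    pvDMin (sel ++ [r]) x = if pyBitDist x r < pvDMin sel x then pyBitDist x r else pvDMin sel x := by
  obtain ⟨v, hv⟩ : ∃ v, PySem.List.min? (sel.map (fun c => pyBitDist x c)) (fun u => u) = some v := by
    rcases h : PySem.List.min? (sel.map (fun c => pyBitDist x c)) (fun u => u) with _ | v
    · exact absurd (by simpa using (PySem.List.min?_eq_none_iff _ _).mp h) hsel
    · exact ⟨v, rfl⟩
  unfold pvDMin PySem.List.min?
  unfold PySem.List.min? at hv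
  simp only [List.map_append, List.map_cons, List.map_nil, List.foldl_append, hv, List.foldl_cons,
    List.foldl_nil]
  by_cases h : pyBitDist x r < v <;> simp [h]

-- B's scan over zip(rows, mind) equals A's max over the filtered remaining list
lemma pv_pick_eq (rows sel chosen : List Int)
    (hc : ∀ x : Int, List.contains chosen x = List.contains sel x) :
    pvB_pick chosen (rows.zip (rows.map (fun r => pvDMin sel r)))
      = Option.map (fun r => (r, pvDMin sel r))
          (PySem.List.max2? (rows.filter (fun r => !(List.contains sel r)))
            (fun r => pvDMin sel r) (fun r => -r)) := by
  rw [pv_zip_map_self]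
  unfold pvB_pick PySem.List.max2?
  rw [← PySem.List.foldl_if_eq_foldl_filter]
  show List.foldl _ (Option.map (fun r => (r, pvDMin sel r)) none) _ = _
  apply pv_foldl_opt_map_rel
  intro a x _
  simp only [hc]
  cases hmem : List.contains sel x with
  | true => simp
  | false =>
    cases a with
    | none => simp
    | some m =>
      simp only [Option.map_some, Bool.not_false, if_true]
      have hcond : (pvDMin sel m < pvDMin sel x || (pvDMin sel m == pvDMin sel x && -m < -x))
          = (decide (pvDMin sel m < pvDMin sel x) ||
             (!decide (pvDMin sel x < pvDMin sel m) && decide (-m < -x))) := by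
        rcases lt_trichotomy (pvDMin sel m) (pvDMin sel x) with h | h | h <;>
          simp [h, not_lt_of_gt]
        omega
      rw [hcond]
      by_cases h : pvDMin sel m < pvDMin sel x ∨ pvDMin sel m ≤ pvDMin sel x ∧ x < m <;> simp [h]

lemma pv_foldl_opt_mem {α : Type} (f : Option α → α → Option α)
    (hf : ∀ (acc : Option α) (x : α), f acc x = acc ∨ f acc x = some x) :
    ∀ (l : List α) (acc : Option α) (mv : α), l.foldl f acc = some mv → acc = some mv ∨ mv ∈ l := by
  intro l
  induction l with
  | nil => intro acc mv h; exact Or.inl h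
  | cons x t ih =>
    intro acc mv h
    rcases ih (f acc x) mv h with h' | h'
    · rcases hf acc x with h2 | h2
      · exact Or.inl (h2 ▸ h')
      · rw [h2] at h'
        simp at h'
        simp [h']
    · exact Or.inr (List.mem_cons_of_mem _ h')

-- the element max2? returns is a member of the list
lemma pv_max2_mem (xs : List Int) (k1 k2 : Int → Int) (mv : Int)
    (h : PySem.List.max2? xs k1 k2 = some mv) : mv ∈ xs := by
  unfold PySem.List.max2? at h
  rcases pv_foldl_opt_mem _ (by
      intro acc x
      cases acc with
      | none => exact Or.inr rfl
      | some m =>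
        dsimp
        split
        · exact Or.inr rfl
        · exact Or.inl rfl) xs none mv h with h' | h'
  · simp at h'
  · exact h'

-- loop invariant: mind is the per-row min distance to sel, chosen has the same members as sel
lemma pv_loop_eq (rows : List Int) (k : Int) :
    ∀ (fuel : Nat) (sel chosen : List Int), sel ≠ [] →
      (∀ x : Int, List.contains chosen x = List.contains sel x) →
      pvB_loop rows k fuel sel chosen (rows.map (fun r => pvDMin sel r)) = pvA_loop rows k fuel sel := by
  intro fuel
  induction fuel with
  | zero => intro sel chosen hsel hc; rfl
  | succ n ih =>
    intro sel chosen hsel hc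
    unfold pvB_loop pvA_loop
    by_cases hk : (sel.length : Int) < k
    · rw [if_pos hk, if_pos hk, pv_pick_eq rows sel chosen hc]
      rcases hmax : PySem.List.max2? (rows.filter fun r => !(List.contains sel r))
          (fun r => pvDMin sel r) (fun r => -r) with _ | nxt
      · simp only [hmax, Option.map_none]
      · simp only [hmax, Option.map_some]
        have hnot : List.contains sel nxt = false := by
          have hm : nxt ∈ rows.filter fun r => !(List.contains sel r) := pv_max2_mem _ _ _ _ hmax
          simpa using (List.of_mem_filter hm)
        have hcm : ∀ y : Int, y ∈ chosen ↔ y ∈ sel := by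
          intro y; have := hc y; simp at this; exact this
        have hnm : ¬ nxt ∈ chosen := by rw [hcm]; simpa using hnot
        have hc' : ∀ x : Int, List.contains (PySem.Set.add chosen nxt) x
            = List.contains (sel ++ [nxt]) x := by
          intro x
          simp [PySem.Set.add]
          rw [if_neg hnm]
          simp [hcm x]
        have hmind : ((rows.map (fun r => pvDMin sel r)).zip
              (rows.map (fun x => pyBitDist x nxt))).map
              (fun md => if md.2 < md.1 then md.2 else md.1)
            = rows.map (fun r => pvDMin (sel ++ [nxt]) r) := by
          rw [pv_zip_map_map]
          simp only [List.map_map]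
          apply List.map_congr_left
          intro x _
          simp only [Function.comp]
          rw [pv_dmin_append sel hsel nxt x]
        rw [hmind]
        exact ih (sel ++ [nxt]) (PySem.Set.add chosen nxt) (by simp) hc'
    · rw [if_neg hk, if_neg hk]

-- ===== VERDICT (by name: the statement is the Claim_ definition above) =====
theorem select_reference_greedy_medoids_py_spec : Claim_equal_select_reference_greedy_medoids_py := by
  intro rows k _dom _hpre
  unfold Spec_select_reference_greedy_medoids_py
  unfold select_reference_greedy_medoids_py select_reference_greedy_medoids_py_alt
  rw [pv_init_eq]
  rcases hmin : PySem.List.min2? rows (fun row => pvSumDist rows row) (fun row => row) with _ | m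
  · simp only [Option.map_none]
  · simp only [Option.map_some]
    have hmind : rows.map (fun r => pyBitDist r m) = rows.map (fun r => pvDMin [m] r) := by
      apply List.map_congr_left
      intro x _
      simp [pvDMin, PySem.List.min?]
    rw [hmind, pv_loop_eq rows k k.toNat [m] (PySem.Set.ofList [m]) (by simp) (by intro x; rfl)]
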